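-- pv_equiv track=rewrite | github.com/andrefpoliveira/AdventOfCode | 2015/day25.py | solve
-- ===== SOURCE A (Python) =====
-- def solve(row, col):
--     value = 31916031
--     current_row, current_col = 1, 2
--     max_row = 3
--
--     while row != current_row or col != current_col:
--         value = (value * 252533) % 33554393
--
--         current_row -= 1
--         current_col += 1
--
--         if current_row == 0:
--             current_row = max_row
--             current_col = 1
--             max_row += 1
--
--     return (value * 252533) % 33554393
-- ===== SOURCE B (Python) =====
-- def solve(row, col):
--     n = (row + col - 1) * (row + col - 2) // 2 + col
--     return 20151125 * pow(252533, n - 1, 33554393) % 33554393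
-- ===== Notes on version B (the rewrite author's own statement) =====
-- stated objective: faster
-- what changed: B replaces A's step-by-step walk along the grid diagonals (one modular multiply per cell) with the closed-form triangular index of (row, col) followed by fast modular exponentiation via 3-arg pow.
-- outside the precondition, e.g. on solve(1, 1): A does not finish within the time limit, B returns 20151125; on solve(2, 1): A does not finish within the time limit, B returns 31916031
import Mathlib
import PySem

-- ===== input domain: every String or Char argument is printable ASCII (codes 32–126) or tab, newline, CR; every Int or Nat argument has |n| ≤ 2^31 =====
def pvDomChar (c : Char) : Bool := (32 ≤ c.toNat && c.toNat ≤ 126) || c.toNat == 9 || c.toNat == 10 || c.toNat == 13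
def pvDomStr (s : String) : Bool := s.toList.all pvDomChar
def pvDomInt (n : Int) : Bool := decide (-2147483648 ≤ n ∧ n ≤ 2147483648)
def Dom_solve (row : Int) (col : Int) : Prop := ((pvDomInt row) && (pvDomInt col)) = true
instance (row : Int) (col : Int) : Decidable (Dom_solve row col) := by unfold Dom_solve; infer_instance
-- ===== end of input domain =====

-- B replaces A's cell-by-cell diagonal walk by the closed-form triangular index and fast
-- modular exponentiation (asymptotically faster); return values agree wherever A terminates.

-- ===== PORT A =====
-- Literal port of A's while-loop; the fuel argument only makes the recursion total:
-- under Pre_solve the loop terminates strictly before the fuel runs out.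
def loopA : Nat → Int → Int → Int → Int → Int → Int → Int
  | 0, value, _, _, _, _, _ => PySem.Int.mod (value * 252533) 33554393
  | fuel+1, value, cr, cc, mr, row, col =>
    if row ≠ cr ∨ col ≠ cc then
      let v := PySem.Int.mod (value * 252533) 33554393
      let cr' := cr - 1
      let cc' := cc + 1
      if cr' = 0 then loopA fuel v mr 1 (mr + 1) row col
      else loopA fuel v cr' cc' mr row col
    else PySem.Int.mod (value * 252533) 33554393

def solve (row : Int) (col : Int) : Int :=
  loopA ((row + col) * (row + col)).toNat 31916031 1 2 3 row col

-- ===== PORT B =====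
-- square-and-multiply, the algorithm behind Python's pow(b, e, m)
def powmod (b : Int) (e : Nat) (m : Int) : Int :=
  if h : e = 0 then PySem.Int.mod 1 m
  else
    let hf := powmod b (e / 2) m
    let sq := PySem.Int.mod (hf * hf) m
    if e % 2 = 1 then PySem.Int.mod (sq * b) m else sq
decreasing_by exact Nat.div_lt_self (Nat.pos_of_ne_zero h) (by omega)

def solve_alt (row : Int) (col : Int) : Int :=
  let n := PySem.Int.floordiv ((row + col - 1) * (row + col - 2)) 2 + col
  PySem.Int.mod (20151125 * powmod 252533 (n - 1).toNat 33554393) 33554393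

-- ===== PRECONDITION & SPEC =====
-- Pre_ excludes exactly the inputs on which A never returns (infinite loop): nonpositive
-- row or col, and the two cells (1,1) and (2,1) that precede A's starting cell.
def Pre_solve (row : Int) (col : Int) : Prop :=
  1 ≤ row ∧ 1 ≤ col ∧ ¬(row = 1 ∧ col = 1) ∧ ¬(row = 2 ∧ col = 1)
instance (row : Int) (col : Int) : Decidable (Pre_solve row col) := by
  unfold Pre_solve; infer_instance

def pvWitness_solve : Int × Int := (3, 4)

def Spec_solve (row : Int) (col : Int) (out : Int) : Prop := out = solve_alt row col
instance (row : Int) (col : Int) (out : Int) : Decidable (Spec_solve row col out) := by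
  unfold Spec_solve; infer_instance

-- ===== CLAIM (what is proved, stated in full; the proofs are below) =====
def Claim_equal_solve : Prop :=
  ∀ (row : Int) (col : Int), Dom_solve row col → Pre_solve row col →
    Spec_solve row col (solve row col)

-- ===== LEMMAS AND PROOFS =====

-- triangular numbers
def tri : Nat → Nat
  | 0 => 0
  | n+1 => tri n + (n + 1)

-- 1-based index of cell (a,b) in A's diagonal enumeration ((1,1) ↦ 1, (2,1) ↦ 2, …)
def idxN (a b : Nat) : Nat := tri (a + b - 2) + b

-- reference sequence: val k = value of the k-th code (0-based)
def val : Nat → Int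
  | 0 => 20151125
  | k+1 => PySem.Int.mod (val k * 252533) 33554393

theorem modM (x : Int) : PySem.Int.mod x 33554393 = x % 33554393 :=
  PySem.Int.mod_eq_emod_of_pos (by norm_num)

theorem tri_succ (n : Nat) : tri (n + 1) = tri n + (n + 1) := rfl

theorem tri_mono {m n : Nat} (h : m ≤ n) : tri m ≤ tri n := by
  induction n with
  | zero => have : m = 0 := by omega
            subst this; exact le_rfl
  | succ n ih =>
    rcases Nat.lt_or_ge m (n+1) with h' | h'
    · have := ih (by omega)
      rw [tri_succ]; omega
    · have : m = n + 1 := by omega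
      subst this; exact le_rfl

theorem tri_le_sq (n : Nat) : tri n ≤ n * n := by
  induction n with
  | zero => exact le_rfl
  | succ n ih => rw [tri_succ]; nlinarith

theorem two_tri (n : Nat) : 2 * tri n = n * (n + 1) := by
  induction n with
  | zero => rfl
  | succ n ih => rw [tri_succ]; nlinarith

theorem tri_sub_step (s : Nat) (h : 2 ≤ s) : tri (s - 1) = tri (s - 2) + (s - 1) := by
  obtain ⟨t, rfl⟩ : ∃ t, s = t + 2 := ⟨s - 2, by omega⟩
  have e1 : t + 2 - 1 = t + 1 := by omega
  have e2 : t + 2 - 2 = t := by omega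
  rw [e1, e2, tri_succ]

theorem idx_inj {a b c d : Nat} (ha : 1 ≤ a) (hb : 1 ≤ b) (hc : 1 ≤ c) (hd : 1 ≤ d)
    (h : idxN a b = idxN c d) : a = c ∧ b = d := by
  unfold idxN at h
  rcases Nat.lt_trichotomy (a + b) (c + d) with hlt | heq | hgt
  · exfalso
    have h1 := tri_sub_step (a + b) (by omega)
    have h2 : tri (a + b - 1) ≤ tri (c + d - 2) := tri_mono (by omega)
    omega
  · have e : c + d - 2 = a + b - 2 := by omega
    rw [e] at h
    exact ⟨by omega, by omega⟩
  · exfalso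
    have h1 := tri_sub_step (c + d) (by omega)
    have h2 : tri (c + d - 1) ≤ tri (a + b - 2) := tri_mono (by omega)
    omega

theorem idx_wrap (b : Nat) (hb : 1 ≤ b) : idxN (b + 1) 1 = idxN 1 b + 1 := by
  unfold idxN
  have h1 : b + 1 + 1 - 2 = (1 + b - 2) + 1 := by omega
  rw [h1, tri_succ]; omega

theorem idx_diag (a b : Nat) (ha : 2 ≤ a) : idxN (a - 1) (b + 1) = idxN a b + 1 := by
  unfold idxN
  have h1 : a - 1 + (b + 1) - 2 = a + b - 2 := by omega
  rw [h1]; omega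

theorem idx_ge_three {a b : Nat} (ha : 1 ≤ a) (hb : 1 ≤ b)
    (h1 : ¬(a = 1 ∧ b = 1)) (h2 : ¬(a = 2 ∧ b = 1)) : 3 ≤ idxN a b := by
  rcases Nat.lt_or_ge (a + b) 4 with hs | hs
  · have : a = 1 ∧ b = 2 := by omega
    obtain ⟨rfl, rfl⟩ := this
    decide
  · have h3 : tri 2 ≤ tri (a + b - 2) := tri_mono (by omega)
    have h4 : tri 2 = 3 := by decide
    unfold idxN; omega

-- main loop invariant: loopA computes val (idx(target) - 1)
theorem loopA_eq : ∀ (fuel : Nat) (a b ta tb : Nat),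
    1 ≤ a → 1 ≤ b → 1 ≤ ta → 1 ≤ tb →
    3 ≤ idxN a b → idxN a b ≤ idxN ta tb → idxN ta tb ≤ fuel + idxN a b →
    loopA fuel (val (idxN a b - 2)) (a : Int) (b : Int) ((a : Int) + (b : Int)) (ta : Int) (tb : Int)
      = val (idxN ta tb - 1) := by
  intro fuel
  induction fuel with
  | zero =>
    intro a b ta tb ha hb hta htb h3 hle hfuel
    have heq : idxN a b = idxN ta tb := by omega
    obtain ⟨h1, h2⟩ := idx_inj ha hb hta htb heq
    subst h1; subst h2
    simp only [loopA]
    have e : idxN a b - 1 = (idxN a b - 2) + 1 := by omega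
    rw [e]; rfl
  | succ fuel ih =>
    intro a b ta tb ha hb hta htb h3 hle hfuel
    have hval : PySem.Int.mod (val (idxN a b - 2) * 252533) 33554393
        = val (idxN a b - 1) := by
      have e : idxN a b - 1 = (idxN a b - 2) + 1 := by omega
      rw [e]; rfl
    by_cases hstop : (ta : Int) = (a : Int) ∧ (tb : Int) = (b : Int)
    · have h1 : a = ta := by exact_mod_cast hstop.1.symm
      have h2 : b = tb := by exact_mod_cast hstop.2.symm
      subst h1; subst h2
      simp only [loopA]
      rw [if_neg (by simp : ¬((a : Int) ≠ (a : Int) ∨ (b : Int) ≠ (b : Int)))]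
      have e : idxN a b - 1 = (idxN a b - 2) + 1 := by omega
      rw [e]; rfl
    · have hne : (ta : Int) ≠ (a : Int) ∨ (tb : Int) ≠ (b : Int) := by tauto
      have hidxne : idxN a b ≠ idxN ta tb := by
        intro h
        obtain ⟨h1, h2⟩ := idx_inj ha hb hta htb h
        exact hstop ⟨by exact_mod_cast h1.symm, by exact_mod_cast h2.symm⟩
      have hlt : idxN a b < idxN ta tb := by omega
      simp only [loopA]
      rw [if_pos hne]
      by_cases hwrap : a = 1
      · subst hwrap
        have hw := idx_wrap b hb
        have key := ih (b + 1) 1 ta tb (by omega) le_rfl hta htb (by omega) (by omega) (by omega)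
        have e3 : idxN (b + 1) 1 - 2 = idxN 1 b - 1 := by omega
        rw [e3] at key
        rw [if_pos (show ((1 : Nat) : Int) - 1 = 0 from by norm_num)]
        rw [hval]
        push_cast at key ⊢
        ring_nf at key ⊢
        exact key
      · have ha2 : 2 ≤ a := by omega
        have hd := idx_diag a b ha2
        have key := ih (a - 1) (b + 1) ta tb (by omega) (by omega) hta htb (by omega) (by omega) (by omega)
        have e3 : idxN (a - 1) (b + 1) - 2 = idxN a b - 1 := by omega
        rw [e3] at key
        rw [if_neg (show ¬((a : Nat) : Int) - 1 = 0 from by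
          intro h
          have : (a : Int) = 1 := by omega
          have : a = 1 := by exact_mod_cast this
          omega)]
        rw [hval]
        have ecast : ((a - 1 : Nat) : Int) = (a : Int) - 1 := by
          push_cast [Nat.cast_sub ha]; ring
        rw [ecast] at key
        push_cast at key ⊢
        ring_nf at key ⊢
        exact key

-- B side: powmod is modular exponentiation
theorem powmod_eq (b m : Int) (hm : 0 < m) : ∀ e : Nat, powmod b e m = (b ^ e) % m := by
  intro e
  induction e using Nat.strong_induction_on with
  | _ e ih =>
    rw [powmod]
    by_cases h : e = 0
    · subst h
      rw [dif_pos rfl, PySem.Int.mod_eq_emod_of_pos hm]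
      norm_num
    · have hrec := ih (e / 2) (Nat.div_lt_self (Nat.pos_of_ne_zero h) (by omega))
      simp only [dif_neg h, hrec, PySem.Int.mod_eq_emod_of_pos hm]
      have hsq : b ^ (e / 2) % m * (b ^ (e / 2) % m) % m = b ^ (e / 2 * 2) % m := by
        rw [← Int.mul_emod, ← pow_add]; ring_nf
      by_cases hodd : e % 2 = 1
      · rw [if_pos hodd, hsq]
        have hstep : b ^ (e / 2 * 2) % m * b % m = b ^ (e / 2 * 2) * b % m := by
          rw [Int.mul_emod, Int.emod_emod_of_dvd _ dvd_rfl, ← Int.mul_emod]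
        rw [hstep, ← pow_succ]
        have he : e / 2 * 2 + 1 = e := by omega
        rw [he]
      · rw [if_neg hodd, hsq]
        have he : e / 2 * 2 = e := by omega
        rw [he]

theorem val_closed : ∀ k : Nat, val k = (20151125 * 252533 ^ k) % 33554393 := by
  intro k
  induction k with
  | zero => norm_num [val]
  | succ k ih =>
    show PySem.Int.mod (val k * 252533) 33554393 = _
    rw [modM, ih, Int.mul_emod, Int.emod_emod_of_dvd _ dvd_rfl, ← Int.mul_emod, pow_succ]
    ring_nf

theorem alt_eq_val (ta tb : Nat) (hta : 1 ≤ ta) (htb : 1 ≤ tb) :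
    solve_alt (ta : Int) (tb : Int) = val (idxN ta tb - 1) := by
  obtain ⟨t, ht⟩ : ∃ t, ta + tb = t + 2 := ⟨ta + tb - 2, by omega⟩
  show PySem.Int.mod (20151125 * powmod 252533
      (PySem.Int.floordiv (((ta : Int) + (tb : Int) - 1) * ((ta : Int) + (tb : Int) - 2)) 2
        + (tb : Int) - 1).toNat 33554393) 33554393 = val (idxN ta tb - 1)
  have hsum1 : (ta : Int) + (tb : Int) - 1 = ((t + 1 : Nat) : Int) := by omega
  have hsum2 : (ta : Int) + (tb : Int) - 2 = ((t : Nat) : Int) := by omega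
  rw [hsum1, hsum2]
  have hmul : ((t + 1 : Nat) : Int) * ((t : Nat) : Int) = ((2 * tri t : Nat) : Int) := by
    have := two_tri t
    push_cast
    nlinarith [this]
  rw [hmul]
  have hdiv : PySem.Int.floordiv ((2 * tri t : Nat) : Int) 2 = ((tri t : Nat) : Int) := by
    calc PySem.Int.floordiv ((2 * tri t : Nat) : Int) 2
        = ((2 * tri t / 2 : Nat) : Int) := by
          exact_mod_cast PySem.Int.floordiv_natCast (2 * tri t) 2
      _ = ((tri t : Nat) : Int) := by congr 1; omega
  rw [hdiv]
  have hn : ((((tri t : Nat) : Int) + (tb : Int) - 1)).toNat = tri t + tb - 1 := by omega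
  rw [hn]
  have hidx : idxN ta tb - 1 = tri t + tb - 1 := by
    unfold idxN
    have : ta + tb - 2 = t := by omega
    rw [this]
  rw [hidx, modM, powmod_eq _ _ (by norm_num), val_closed,
    Int.mul_emod, Int.emod_emod_of_dvd _ dvd_rfl, ← Int.mul_emod]

-- fuel bound: the coarse fuel in solve always suffices
theorem idx_le_fuel (ta tb : Nat) (hta : 1 ≤ ta) (htb : 1 ≤ tb) :
    idxN ta tb ≤ (ta + tb) * (ta + tb) + 3 := by
  unfold idxN
  obtain ⟨t, ht⟩ : ∃ t, ta + tb = t + 2 := ⟨ta + tb - 2, by omega⟩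
  rw [ht]
  have e : t + 2 - 2 = t := by omega
  rw [e]
  have h1 : tri t ≤ t * t := tri_le_sq t
  have hx : (t + 2) * (t + 2) = t * t + 4 * t + 4 := by ring
  omega

-- ===== VERDICT (by name: the statement is the Claim_ definition above) =====
theorem solve_spec : Claim_equal_solve := by
  unfold Claim_equal_solve
  intro row col _ hpre
  obtain ⟨h1, h2, h3, h4⟩ := hpre
  unfold Spec_solve
  set ta := row.toNat with hta'
  set tb := col.toNat with htb'
  have hrow : row = (ta : Int) := by omega
  have hcol : col = (tb : Int) := by omega
  have hta : 1 ≤ ta := by omega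
  have htb : 1 ≤ tb := by omega
  have hn1 : ¬(ta = 1 ∧ tb = 1) := by rintro ⟨x, y⟩; exact h3 ⟨by omega, by omega⟩
  have hn2 : ¬(ta = 2 ∧ tb = 1) := by rintro ⟨x, y⟩; exact h4 ⟨by omega, by omega⟩
  have hidx3 : 3 ≤ idxN ta tb := idx_ge_three hta htb hn1 hn2
  rw [hrow, hcol]
  unfold solve
  have hfuel : (((ta : Int) + (tb : Int)) * ((ta : Int) + (tb : Int))).toNat
      = (ta + tb) * (ta + tb) := by
    rw [← Nat.cast_add, ← Nat.cast_mul, Int.toNat_natCast]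
  rw [hfuel]
  have hstart : idxN 1 2 = 3 := by decide
  have key := loopA_eq ((ta + tb) * (ta + tb)) 1 2 ta tb (by omega) (by omega) hta htb
    (by omega) (by omega) (by have := idx_le_fuel ta tb hta htb; omega)
  rw [hstart] at key
  have hval0 : val (3 - 2) = 31916031 := by decide
  rw [hval0] at key
  norm_num at key
  rw [key, alt_eq_val ta tb hta htb]
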